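-- pv_equiv track=rewrite | github.com/jinaur/python | nypc/2022_비트문자열.py | get
-- ===== SOURCE A (Python) =====
-- def get(K, x):
--     if K == 0:
--         return 0
--     if K > 60:
--         ret = get(60, x)
--         if K % 2 == 1:
--             ret ^= 1
--         return ret
--
--     n = 1 << K
--     m = n // 2
--     if x > m:
--         return get(K - 1, x - m)
--     return get(K - 1, x) ^ 1
-- ===== SOURCE B (Python) =====
-- def get(K, x):
--     if K > 60:
--         ret = 1 if K % 2 == 1 else 0
--         K = 60
--     else:
--         ret = 0
--     for k in range(K, 0, -1):
--         m = 1 << (k - 1)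
--         if x > m:
--             x -= m
--         else:
--             ret ^= 1
--     return ret
-- ===== Notes on version B (the rewrite author's own statement) =====
-- stated objective: alternative
-- what changed: Replaces A's recursion (one stack frame per level, plus a recomputed 1<<K each call) by a single explicit loop from K down to 1 over an xor accumulator, folding the K>60 parity reduction into the accumulator's initial value.
import Mathlib
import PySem

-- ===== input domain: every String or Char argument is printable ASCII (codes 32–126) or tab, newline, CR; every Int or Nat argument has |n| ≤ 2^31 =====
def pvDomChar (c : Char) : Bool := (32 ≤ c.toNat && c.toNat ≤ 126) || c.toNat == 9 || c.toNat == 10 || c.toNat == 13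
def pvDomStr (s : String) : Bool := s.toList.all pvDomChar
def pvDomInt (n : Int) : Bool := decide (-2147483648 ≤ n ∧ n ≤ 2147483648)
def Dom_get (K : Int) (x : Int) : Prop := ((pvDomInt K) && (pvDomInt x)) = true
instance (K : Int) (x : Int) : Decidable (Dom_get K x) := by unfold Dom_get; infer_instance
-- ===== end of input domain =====

-- B replaces A's recursion by one explicit loop with an xor accumulator (alternative decomposition, same cost).

-- ===== PORT A =====
def get (K : Int) (x : Int) : Int :=
  if K = 0 then 0
  else if K < 0 then 0   -- totality guard: Python raises ValueError (negative shift count) here; outside Pre_get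
  else if K > 60 then
    let ret := get 60 x
    if K % 2 = 1 then PySem.Int.bxor ret 1 else ret
  else
    let n : Int := 2 ^ K.toNat          -- 1 << K (here 1 ≤ K ≤ 60)
    let m := PySem.Int.floordiv n 2
    if x > m then get (K - 1) (x - m)
    else PySem.Int.bxor (get (K - 1) x) 1
termination_by K.toNat
decreasing_by all_goals omega

-- ===== PORT B =====
-- loop body of Source B's for-loop; state = (x, ret)
def pvStep (s : Int × Int) (k : Int) : Int × Int :=
  let m : Int := 2 ^ (k - 1).toNat      -- 1 << (k - 1) (k ≥ 1 inside the loop)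
  if s.1 > m then (s.1 - m, s.2) else (s.1, PySem.Int.bxor s.2 1)

def get_alt (K : Int) (x : Int) : Int :=
  let p : Int × Int := if K > 60 then ((if K % 2 = 1 then 1 else 0), 60) else (0, K)
  ((PySem.List.pyRange p.2 0 (-1)).foldl pvStep (x, p.1)).2

-- ===== PRECONDITION & SPEC =====
-- Pre_ excludes exactly K < 0, where A raises ValueError (negative shift count).
def Pre_get (K : Int) (x : Int) : Prop := 0 ≤ K
instance (K : Int) (x : Int) : Decidable (Pre_get K x) := by unfold Pre_get; infer_instance
def pvWitness_get : Int × Int := (3, 5)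

def Spec_get (K : Int) (x : Int) (out : Int) : Prop := out = get_alt K x
instance (K : Int) (x : Int) (out : Int) : Decidable (Spec_get K x out) := by unfold Spec_get; infer_instance

-- ===== CLAIM (what is proved, stated in full; the proofs are below) =====
def Claim_equal_get : Prop := ∀ (K : Int) (x : Int), Dom_get K x → Pre_get K x → Spec_get K x (get K x)

-- ===== LEMMAS AND PROOFS =====

-- the accumulator of B's loop stays in {0, 1}
lemma pvStep_snd01 (l : List Int) (x r : Int) (h : r = 0 ∨ r = 1) :
    (l.foldl pvStep (x, r)).2 = 0 ∨ (l.foldl pvStep (x, r)).2 = 1 := by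
  induction l generalizing x r with
  | nil => simpa using h
  | cons k l ih =>
      simp only [List.foldl_cons, pvStep]
      split
      · exact ih _ _ h
      · exact ih _ _ (by rcases h with h | h <;> subst h <;> decide)

lemma bxor_shift (r t : Int) (hr : r = 0 ∨ r = 1) (ht : t = 0 ∨ t = 1) :
    PySem.Int.bxor (PySem.Int.bxor r 1) t = PySem.Int.bxor r (PySem.Int.bxor 1 t) := by
  rcases hr with hr | hr <;> rcases ht with ht | ht <;> subst hr <;> subst ht <;> decide

-- extracting the initial accumulator out of B's loop
lemma foldl_acc (l : List Int) (x r : Int) (hr : r = 0 ∨ r = 1) :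
    l.foldl pvStep (x, r) = ((l.foldl pvStep (x, 0)).1, PySem.Int.bxor r (l.foldl pvStep (x, 0)).2) := by
  induction l generalizing x r with
  | nil => simp
  | cons k l ih =>
      simp only [List.foldl_cons, pvStep]
      split
      · exact ih _ _ hr
      · rw [ih _ _ (by rcases hr with h | h <;> subst h <;> decide),
            ih x (PySem.Int.bxor 0 1) (by decide)]
        have : PySem.Int.bxor 0 1 = 1 := by decide
        rw [this, bxor_shift r _ hr (pvStep_snd01 l x 0 (by decide))]

-- A's recursion computes B's loop for 0 ≤ K ≤ 60
lemma getA_loop : ∀ (n : Nat), n ≤ 60 → ∀ x : Int,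
    get (n : Int) x = ((PySem.List.pyRange (n : Int) 0 (-1)).foldl pvStep (x, 0)).2 := by
  intro n
  induction n with
  | zero =>
      intro _ x
      rw [PySem.List.pyRange_neg_one_eq_nil (by norm_num)]
      rw [_root_.get.eq_def]; simp
  | succ n ih =>
      intro hle x
      have h1 : (0:Int) < (↑(n+1) : Int) := by exact_mod_cast Nat.succ_pos n
      rw [PySem.List.pyRange_neg_one_cons (by exact_mod_cast h1)]
      rw [_root_.get.eq_def]
      have hne : ((n+1 : Nat) : Int) ≠ 0 := by exact_mod_cast Nat.succ_ne_zero n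
      have hnlt : ¬ ((n+1 : Nat) : Int) < 0 := by omega
      have hngt : ¬ ((n+1 : Nat) : Int) > 60 := by exact_mod_cast by omega
      simp only [hne, hnlt, hngt, if_false]
      have htn : ((n+1 : Nat) : Int).toNat = n + 1 := by omega
      have hm : PySem.Int.floordiv (2 ^ ((n+1 : Nat) : Int).toNat) 2 = 2 ^ n := by
        rw [htn, PySem.Int.floordiv_eq_ediv_of_pos (by norm_num), pow_succ,
            Int.mul_ediv_cancel _ (by norm_num)]
      rw [hm]
      have hsub : ((n+1 : Nat) : Int) - 1 = (n : Int) := by push_cast; ring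
      simp only [List.foldl_cons, pvStep, hsub]
      have htn' : ((n : Int)).toNat = n := Int.toNat_natCast n
      rw [htn']
      split
      · exact ih (by omega) _
      · rw [foldl_acc _ _ _ (by decide)]
        have h01 : PySem.Int.bxor 0 1 = 1 := by decide
        rw [h01, ih (by omega) x,
            PySem.Int.bxor_comm]

-- ===== VERDICT (by name: the statement is the Claim_ definition above) =====
theorem get_spec : Claim_equal_get := by
  intro K x _ hpre
  unfold Spec_get get_alt
  by_cases h60 : K > 60
  · simp only [h60, if_true]
    have h60' : PySem.List.pyRange ((60:Int)) 0 (-1) =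
        PySem.List.pyRange (((60:Nat)):Int) 0 (-1) := by norm_num
    have hA60 : get 60 x = ((PySem.List.pyRange ((60:Int)) 0 (-1)).foldl pvStep (x, 0)).2 := by
      rw [h60']
      exact_mod_cast getA_loop 60 (le_refl _) x
    rw [_root_.get.eq_def]
    have hne : K ≠ 0 := by omega
    have hnlt : ¬ K < 0 := by omega
    simp only [hne, hnlt, h60, if_false, if_true]
    by_cases hod : K % 2 = 1
    · simp only [hod, if_true]
      rw [foldl_acc _ _ _ (by decide), ← hA60, PySem.Int.bxor_comm]
    · simp only [hod, if_false]
      rw [foldl_acc _ _ _ (by decide), ← hA60, PySem.Int.bxor_comm, PySem.Int.bxor_zero]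
  · simp only [h60, if_false]
    have hK : K = ((K.toNat : Nat) : Int) := (Int.toNat_of_nonneg hpre).symm
    rw [hK]
    exact getA_loop K.toNat (by omega) x
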